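-- pv_equiv track=rewrite | github.com/JacobWebsite/TheOrganizer-Labor-Research-Platform | scripts/analysis/demographics_comparison/classifiers.py | classify_naics_group
-- ===== SOURCE A (Python) =====
-- NAICS_GROUPS = [
--     ('Food/Bev Manufacturing (311,312)', ['311', '312']),
--     ('Chemical/Material Mfg (325-327)', ['325', '326', '327']),
--     ('Metal/Machinery Mfg (331-333)', ['331', '332', '333']),
--     ('Computer/Electrical Mfg (334-335)', ['334', '335']),
--     ('Transport Equip Mfg (336)', ['336']),
--     ('Agriculture/Mining (11,21)', ['11', '21']),
--     ('Utilities (22)', ['22']),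
--     ('Construction (23)', ['23']),
--     ('Other Manufacturing', ['31', '32', '33']),  # catch-all after specific mfg
--     ('Wholesale Trade (42)', ['42']),
--     ('Retail Trade (44-45)', ['44', '45']),
--     ('Transportation/Warehousing (48-49)', ['48', '49']),
--     ('Information (51)', ['51']),
--     ('Finance/Insurance (52)', ['52']),
--     ('Professional/Technical (54)', ['54']),
--     ('Admin/Staffing (56)', ['56']),
--     ('Healthcare/Social (62)', ['62']),
--     ('Accommodation/Food Svc (72)', ['72']),
-- ]
--
-- def classify_naics_group(naics):
--     """Classify NAICS code into industry group. Match longest prefix first."""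
--     if not naics:
--         return 'Other'
--     # Sort each group's prefixes by length desc so longest matches first
--     for group_label, prefixes in NAICS_GROUPS:
--         for prefix in sorted(prefixes, key=len, reverse=True):
--             if naics.startswith(prefix):
--                 return group_label
--     return 'Other'
-- ===== SOURCE B (Python) =====
-- NAICS_GROUPS = [
--     ('Food/Bev Manufacturing (311,312)', ['311', '312']),
--     ('Chemical/Material Mfg (325-327)', ['325', '326', '327']),
--     ('Metal/Machinery Mfg (331-333)', ['331', '332', '333']),
--     ('Computer/Electrical Mfg (334-335)', ['334', '335']),
--     ('Transport Equip Mfg (336)', ['336']),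
--     ('Agriculture/Mining (11,21)', ['11', '21']),
--     ('Utilities (22)', ['22']),
--     ('Construction (23)', ['23']),
--     ('Other Manufacturing', ['31', '32', '33']),  # catch-all after specific mfg
--     ('Wholesale Trade (42)', ['42']),
--     ('Retail Trade (44-45)', ['44', '45']),
--     ('Transportation/Warehousing (48-49)', ['48', '49']),
--     ('Information (51)', ['51']),
--     ('Finance/Insurance (52)', ['52']),
--     ('Professional/Technical (54)', ['54']),
--     ('Admin/Staffing (56)', ['56']),
--     ('Healthcare/Social (62)', ['62']),
--     ('Accommodation/Food Svc (72)', ['72']),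
-- ]
--
-- # Precomputed once: prefix -> label, split by prefix length (longest-prefix
-- # precedence = try the 3-char map first, then the 2-char map).
-- _MAP3 = {}
-- _MAP2 = {}
-- for _label, _prefixes in NAICS_GROUPS:
--     for _p in _prefixes:
--         _m = _MAP3 if len(_p) == 3 else _MAP2
--         _m.setdefault(_p, _label)
--
--
-- def classify_naics_group(naics):
--     """Classify NAICS code into industry group. Match longest prefix first."""
--     if not naics:
--         return 'Other'
--     return _MAP3.get(naics[:3]) or _MAP2.get(naics[:2]) or 'Other'
-- ===== Notes on version B (the rewrite author's own statement) =====
-- stated objective: simpler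
-- what changed: Replaces A's per-call nested scan over the whole prefix table (with per-group re-sorting by length) by two direct lookups of naics[:3] and naics[:2] in prefix->label dicts precomputed once at module load.
import Mathlib
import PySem

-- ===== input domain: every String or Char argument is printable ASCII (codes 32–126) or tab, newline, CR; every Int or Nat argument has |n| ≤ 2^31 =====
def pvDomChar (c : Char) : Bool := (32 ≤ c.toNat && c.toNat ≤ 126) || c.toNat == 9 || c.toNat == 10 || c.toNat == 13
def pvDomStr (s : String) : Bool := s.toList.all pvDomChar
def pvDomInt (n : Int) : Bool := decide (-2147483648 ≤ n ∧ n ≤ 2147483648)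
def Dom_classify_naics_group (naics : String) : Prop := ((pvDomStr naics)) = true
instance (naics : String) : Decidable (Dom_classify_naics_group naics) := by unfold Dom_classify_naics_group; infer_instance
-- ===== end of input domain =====

-- B replaces A's per-call scan of the whole prefix table by two lookups ([:3], then [:2])
-- in prefix maps precomputed once from the same table (objective: simpler lookup structure).

-- ===== PORT A =====
def pvNAICS_GROUPS : List (String × List String) := [
  ("Food/Bev Manufacturing (311,312)", ["311", "312"]),
  ("Chemical/Material Mfg (325-327)", ["325", "326", "327"]),
  ("Metal/Machinery Mfg (331-333)", ["331", "332", "333"]),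
  ("Computer/Electrical Mfg (334-335)", ["334", "335"]),
  ("Transport Equip Mfg (336)", ["336"]),
  ("Agriculture/Mining (11,21)", ["11", "21"]),
  ("Utilities (22)", ["22"]),
  ("Construction (23)", ["23"]),
  ("Other Manufacturing", ["31", "32", "33"]),
  ("Wholesale Trade (42)", ["42"]),
  ("Retail Trade (44-45)", ["44", "45"]),
  ("Transportation/Warehousing (48-49)", ["48", "49"]),
  ("Information (51)", ["51"]),
  ("Finance/Insurance (52)", ["52"]),
  ("Professional/Technical (54)", ["54"]),
  ("Admin/Staffing (56)", ["56"]),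
  ("Healthcare/Social (62)", ["62"]),
  ("Accommodation/Food Svc (72)", ["72"])
]

-- inner 'for prefix in sorted(prefixes, key=len, reverse=True): if naics.startswith(prefix): return group_label'
def pvScanPrefixes (naics label : String) : List String → Option String
  | [] => none
  | p :: rest => if PySem.Str.startswith naics p then some label else pvScanPrefixes naics label rest

-- outer 'for group_label, prefixes in NAICS_GROUPS' (some r = an early return)
def pvScanGroups (naics : String) : List (String × List String) → Option String
  | [] => none
  | (label, prefixes) :: rest =>
    match pvScanPrefixes naics label (PySem.List.sorted prefixes (fun p => PySem.Str.len p) true) with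
    | some r => some r
    | none => pvScanGroups naics rest

def classify_naics_group (naics : String) : String :=
  if naics = "" then "Other"
  else
    match pvScanGroups naics pvNAICS_GROUPS with
    | some r => r
    | none => "Other"

-- ===== PORT B =====
-- the module-level build loop of Source B: flatten NAICS_GROUPS once into two maps, split by prefix length
def pvBuildMaps : PySem.Dict String String × PySem.Dict String String :=
  pvNAICS_GROUPS.foldl
    (fun ms g => g.2.foldl
      (fun ms p =>
        if PySem.Str.len p == 3 then (ms.1.setdefault p g.1, ms.2)
        else (ms.1, ms.2.setdefault p g.1))
      ms)
    (PySem.Dict.empty, PySem.Dict.empty)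

def pvMAP3 : PySem.Dict String String := pvBuildMaps.1
def pvMAP2 : PySem.Dict String String := pvBuildMaps.2

-- Python 'x or y' on an Optional[str] left operand (None and '' are falsy)
def pvOrStr (o : Option String) (d : String) : String :=
  match o with
  | some s => if s = "" then d else s
  | none => d

def classify_naics_group_alt (naics : String) : String :=
  if naics = "" then "Other"
  else
    pvOrStr (pvMAP3.get? (PySem.Str.slice naics none (some 3)))
      (pvOrStr (pvMAP2.get? (PySem.Str.slice naics none (some 2))) "Other")

-- ===== PRECONDITION & SPEC =====
def Spec_classify_naics_group (naics : String) (out : String) : Prop := out = classify_naics_group_alt naics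
instance (naics : String) (out : String) : Decidable (Spec_classify_naics_group naics out) := by unfold Spec_classify_naics_group; infer_instance

-- ===== CLAIM (what is proved, stated in full; the proofs are below) =====
def Claim_equal_classify_naics_group : Prop := ∀ (naics : String), Dom_classify_naics_group naics → Spec_classify_naics_group naics (classify_naics_group naics)

-- ===== LEMMAS AND PROOFS =====

-- naics.startswith(p) for a 3-char p is exactly 'p == naics[:3]' (how B's first map lookup tests it)
theorem pvAtom3 (naics p : String) (hp : p.toList.length = 3) :
    (p == PySem.Str.slice naics none (some 3)) = PySem.Str.startswith naics p := by
  rw [Bool.eq_iff_iff, beq_iff_eq, PySem.Str.startswith_eq, PySem.Chars.startswith_iff,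
      List.prefix_iff_eq_take, hp, String.ext_iff]
  have h : (PySem.Str.slice naics none (some 3)).toList = naics.toList.take 3 := by
    simp [PySem.Str.slice, PySem.List.slice_to]
  rw [h]

-- the same for a 2-char p and naics[:2]
theorem pvAtom2 (naics p : String) (hp : p.toList.length = 2) :
    (p == PySem.Str.slice naics none (some 2)) = PySem.Str.startswith naics p := by
  rw [Bool.eq_iff_iff, beq_iff_eq, PySem.Str.startswith_eq, PySem.Chars.startswith_iff,
      List.prefix_iff_eq_take, hp, String.ext_iff]
  have h : (PySem.Str.slice naics none (some 2)).toList = naics.toList.take 2 := by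
    simp [PySem.Str.slice, PySem.List.slice_to]
  rw [h]

-- ===== VERDICT (by name: the statement is the Claim_ definition above) =====
set_option maxHeartbeats 4000000 in
theorem classify_naics_group_spec : Claim_equal_classify_naics_group := by
  intro naics _
  unfold Spec_classify_naics_group
  by_cases h : naics = ""
  · simp [classify_naics_group, classify_naics_group_alt, h]
  · have hm3 : pvMAP3 = PySem.Dict.mk [("311", "Food/Bev Manufacturing (311,312)"), ("312", "Food/Bev Manufacturing (311,312)"), ("325", "Chemical/Material Mfg (325-327)"), ("326", "Chemical/Material Mfg (325-327)"), ("327", "Chemical/Material Mfg (325-327)"), ("331", "Metal/Machinery Mfg (331-333)"), ("332", "Metal/Machinery Mfg (331-333)"), ("333", "Metal/Machinery Mfg (331-333)"), ("334", "Computer/Electrical Mfg (334-335)"), ("335", "Computer/Electrical Mfg (334-335)"), ("336", "Transport Equip Mfg (336)")] := by decide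
    have hm2 : pvMAP2 = PySem.Dict.mk [("11", "Agriculture/Mining (11,21)"), ("21", "Agriculture/Mining (11,21)"), ("22", "Utilities (22)"), ("23", "Construction (23)"), ("31", "Other Manufacturing"), ("32", "Other Manufacturing"), ("33", "Other Manufacturing"), ("42", "Wholesale Trade (42)"), ("44", "Retail Trade (44-45)"), ("45", "Retail Trade (44-45)"), ("48", "Transportation/Warehousing (48-49)"), ("49", "Transportation/Warehousing (48-49)"), ("51", "Information (51)"), ("52", "Finance/Insurance (52)"), ("54", "Professional/Technical (54)"), ("56", "Admin/Staffing (56)"), ("62", "Healthcare/Social (62)"), ("72", "Accommodation/Food Svc (72)")] := by decide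
    have hnil : ∀ x : String, (PySem.Dict.mk ([] : List (String × String))).get? x = none := by
      intro x; simp [PySem.Dict.get?]
    have s0 : PySem.List.sorted ["311", "312"] (fun p => PySem.Str.len p) true = ["311", "312"] := by decide
    have s1 : PySem.List.sorted ["325", "326", "327"] (fun p => PySem.Str.len p) true = ["325", "326", "327"] := by decide
    have s2 : PySem.List.sorted ["331", "332", "333"] (fun p => PySem.Str.len p) true = ["331", "332", "333"] := by decide
    have s3 : PySem.List.sorted ["334", "335"] (fun p => PySem.Str.len p) true = ["334", "335"] := by decide
    have s4 : PySem.List.sorted ["336"] (fun p => PySem.Str.len p) true = ["336"] := by decide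
    have s5 : PySem.List.sorted ["11", "21"] (fun p => PySem.Str.len p) true = ["11", "21"] := by decide
    have s6 : PySem.List.sorted ["22"] (fun p => PySem.Str.len p) true = ["22"] := by decide
    have s7 : PySem.List.sorted ["23"] (fun p => PySem.Str.len p) true = ["23"] := by decide
    have s8 : PySem.List.sorted ["31", "32", "33"] (fun p => PySem.Str.len p) true = ["31", "32", "33"] := by decide
    have s9 : PySem.List.sorted ["42"] (fun p => PySem.Str.len p) true = ["42"] := by decide
    have s10 : PySem.List.sorted ["44", "45"] (fun p => PySem.Str.len p) true = ["44", "45"] := by decide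
    have s11 : PySem.List.sorted ["48", "49"] (fun p => PySem.Str.len p) true = ["48", "49"] := by decide
    have s12 : PySem.List.sorted ["51"] (fun p => PySem.Str.len p) true = ["51"] := by decide
    have s13 : PySem.List.sorted ["52"] (fun p => PySem.Str.len p) true = ["52"] := by decide
    have s14 : PySem.List.sorted ["54"] (fun p => PySem.Str.len p) true = ["54"] := by decide
    have s15 : PySem.List.sorted ["56"] (fun p => PySem.Str.len p) true = ["56"] := by decide
    have s16 : PySem.List.sorted ["62"] (fun p => PySem.Str.len p) true = ["62"] := by decide
    have s17 : PySem.List.sorted ["72"] (fun p => PySem.Str.len p) true = ["72"] := by decide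
    have a311 : (("311" : String) == PySem.Str.slice naics none (some 3)) = PySem.Str.startswith naics "311" := pvAtom3 naics "311" (by decide)
    have a312 : (("312" : String) == PySem.Str.slice naics none (some 3)) = PySem.Str.startswith naics "312" := pvAtom3 naics "312" (by decide)
    have a325 : (("325" : String) == PySem.Str.slice naics none (some 3)) = PySem.Str.startswith naics "325" := pvAtom3 naics "325" (by decide)
    have a326 : (("326" : String) == PySem.Str.slice naics none (some 3)) = PySem.Str.startswith naics "326" := pvAtom3 naics "326" (by decide)
    have a327 : (("327" : String) == PySem.Str.slice naics none (some 3)) = PySem.Str.startswith naics "327" := pvAtom3 naics "327" (by decide)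
    have a331 : (("331" : String) == PySem.Str.slice naics none (some 3)) = PySem.Str.startswith naics "331" := pvAtom3 naics "331" (by decide)
    have a332 : (("332" : String) == PySem.Str.slice naics none (some 3)) = PySem.Str.startswith naics "332" := pvAtom3 naics "332" (by decide)
    have a333 : (("333" : String) == PySem.Str.slice naics none (some 3)) = PySem.Str.startswith naics "333" := pvAtom3 naics "333" (by decide)
    have a334 : (("334" : String) == PySem.Str.slice naics none (some 3)) = PySem.Str.startswith naics "334" := pvAtom3 naics "334" (by decide)
    have a335 : (("335" : String) == PySem.Str.slice naics none (some 3)) = PySem.Str.startswith naics "335" := pvAtom3 naics "335" (by decide)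
    have a336 : (("336" : String) == PySem.Str.slice naics none (some 3)) = PySem.Str.startswith naics "336" := pvAtom3 naics "336" (by decide)
    have a11 : (("11" : String) == PySem.Str.slice naics none (some 2)) = PySem.Str.startswith naics "11" := pvAtom2 naics "11" (by decide)
    have a21 : (("21" : String) == PySem.Str.slice naics none (some 2)) = PySem.Str.startswith naics "21" := pvAtom2 naics "21" (by decide)
    have a22 : (("22" : String) == PySem.Str.slice naics none (some 2)) = PySem.Str.startswith naics "22" := pvAtom2 naics "22" (by decide)
    have a23 : (("23" : String) == PySem.Str.slice naics none (some 2)) = PySem.Str.startswith naics "23" := pvAtom2 naics "23" (by decide)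
    have a31 : (("31" : String) == PySem.Str.slice naics none (some 2)) = PySem.Str.startswith naics "31" := pvAtom2 naics "31" (by decide)
    have a32 : (("32" : String) == PySem.Str.slice naics none (some 2)) = PySem.Str.startswith naics "32" := pvAtom2 naics "32" (by decide)
    have a33 : (("33" : String) == PySem.Str.slice naics none (some 2)) = PySem.Str.startswith naics "33" := pvAtom2 naics "33" (by decide)
    have a42 : (("42" : String) == PySem.Str.slice naics none (some 2)) = PySem.Str.startswith naics "42" := pvAtom2 naics "42" (by decide)
    have a44 : (("44" : String) == PySem.Str.slice naics none (some 2)) = PySem.Str.startswith naics "44" := pvAtom2 naics "44" (by decide)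
    have a45 : (("45" : String) == PySem.Str.slice naics none (some 2)) = PySem.Str.startswith naics "45" := pvAtom2 naics "45" (by decide)
    have a48 : (("48" : String) == PySem.Str.slice naics none (some 2)) = PySem.Str.startswith naics "48" := pvAtom2 naics "48" (by decide)
    have a49 : (("49" : String) == PySem.Str.slice naics none (some 2)) = PySem.Str.startswith naics "49" := pvAtom2 naics "49" (by decide)
    have a51 : (("51" : String) == PySem.Str.slice naics none (some 2)) = PySem.Str.startswith naics "51" := pvAtom2 naics "51" (by decide)
    have a52 : (("52" : String) == PySem.Str.slice naics none (some 2)) = PySem.Str.startswith naics "52" := pvAtom2 naics "52" (by decide)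
    have a54 : (("54" : String) == PySem.Str.slice naics none (some 2)) = PySem.Str.startswith naics "54" := pvAtom2 naics "54" (by decide)
    have a56 : (("56" : String) == PySem.Str.slice naics none (some 2)) = PySem.Str.startswith naics "56" := pvAtom2 naics "56" (by decide)
    have a62 : (("62" : String) == PySem.Str.slice naics none (some 2)) = PySem.Str.startswith naics "62" := pvAtom2 naics "62" (by decide)
    have a72 : (("72" : String) == PySem.Str.slice naics none (some 2)) = PySem.Str.startswith naics "72" := pvAtom2 naics "72" (by decide)
    simp only [classify_naics_group, classify_naics_group_alt, if_neg h]
    simp only [pvNAICS_GROUPS, pvScanGroups, pvScanPrefixes, s0, s1, s2, s3, s4, s5, s6, s7, s8, s9, s10, s11, s12, s13, s14, s15, s16, s17]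
    simp only [hm3, hm2, PySem.Dict.get?_mk_cons, hnil]
    simp only [a311, a312, a325, a326, a327, a331, a332, a333, a334, a335, a336, a11, a21, a22, a23, a31, a32, a33, a42, a44, a45, a48, a49, a51, a52, a54, a56, a62, a72]
    by_cases c311 : PySem.Str.startswith naics "311" = true
    · simp only [if_pos c311]
      rfl
    simp only [if_neg c311]
    by_cases c312 : PySem.Str.startswith naics "312" = true
    · simp only [if_pos c312]
      rfl
    simp only [if_neg c312]
    by_cases c325 : PySem.Str.startswith naics "325" = true
    · simp only [if_pos c325]
      rfl
    simp only [if_neg c325]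
    by_cases c326 : PySem.Str.startswith naics "326" = true
    · simp only [if_pos c326]
      rfl
    simp only [if_neg c326]
    by_cases c327 : PySem.Str.startswith naics "327" = true
    · simp only [if_pos c327]
      rfl
    simp only [if_neg c327]
    by_cases c331 : PySem.Str.startswith naics "331" = true
    · simp only [if_pos c331]
      rfl
    simp only [if_neg c331]
    by_cases c332 : PySem.Str.startswith naics "332" = true
    · simp only [if_pos c332]
      rfl
    simp only [if_neg c332]
    by_cases c333 : PySem.Str.startswith naics "333" = true
    · simp only [if_pos c333]
      rfl
    simp only [if_neg c333]
    by_cases c334 : PySem.Str.startswith naics "334" = true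
    · simp only [if_pos c334]
      rfl
    simp only [if_neg c334]
    by_cases c335 : PySem.Str.startswith naics "335" = true
    · simp only [if_pos c335]
      rfl
    simp only [if_neg c335]
    by_cases c336 : PySem.Str.startswith naics "336" = true
    · simp only [if_pos c336]
      rfl
    simp only [if_neg c336]
    by_cases c11 : PySem.Str.startswith naics "11" = true
    · simp only [if_pos c11]
      rfl
    simp only [if_neg c11]
    by_cases c21 : PySem.Str.startswith naics "21" = true
    · simp only [if_pos c21]
      rfl
    simp only [if_neg c21]
    by_cases c22 : PySem.Str.startswith naics "22" = true
    · simp only [if_pos c22]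
      rfl
    simp only [if_neg c22]
    by_cases c23 : PySem.Str.startswith naics "23" = true
    · simp only [if_pos c23]
      rfl
    simp only [if_neg c23]
    by_cases c31 : PySem.Str.startswith naics "31" = true
    · simp only [if_pos c31]
      rfl
    simp only [if_neg c31]
    by_cases c32 : PySem.Str.startswith naics "32" = true
    · simp only [if_pos c32]
      rfl
    simp only [if_neg c32]
    by_cases c33 : PySem.Str.startswith naics "33" = true
    · simp only [if_pos c33]
      rfl
    simp only [if_neg c33]
    by_cases c42 : PySem.Str.startswith naics "42" = true
    · simp only [if_pos c42]
      rfl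
    simp only [if_neg c42]
    by_cases c44 : PySem.Str.startswith naics "44" = true
    · simp only [if_pos c44]
      rfl
    simp only [if_neg c44]
    by_cases c45 : PySem.Str.startswith naics "45" = true
    · simp only [if_pos c45]
      rfl
    simp only [if_neg c45]
    by_cases c48 : PySem.Str.startswith naics "48" = true
    · simp only [if_pos c48]
      rfl
    simp only [if_neg c48]
    by_cases c49 : PySem.Str.startswith naics "49" = true
    · simp only [if_pos c49]
      rfl
    simp only [if_neg c49]
    by_cases c51 : PySem.Str.startswith naics "51" = true
    · simp only [if_pos c51]
      rfl
    simp only [if_neg c51]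
    by_cases c52 : PySem.Str.startswith naics "52" = true
    · simp only [if_pos c52]
      rfl
    simp only [if_neg c52]
    by_cases c54 : PySem.Str.startswith naics "54" = true
    · simp only [if_pos c54]
      rfl
    simp only [if_neg c54]
    by_cases c56 : PySem.Str.startswith naics "56" = true
    · simp only [if_pos c56]
      rfl
    simp only [if_neg c56]
    by_cases c62 : PySem.Str.startswith naics "62" = true
    · simp only [if_pos c62]
      rfl
    simp only [if_neg c62]
    by_cases c72 : PySem.Str.startswith naics "72" = true
    · simp only [if_pos c72]
      rfl
    simp only [if_neg c72]
    rfl
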